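-- pv_equiv track=rewrite | github.com/rancher/rke2-docs | scripts/help_to_markdown.py | constructHeader
-- ===== SOURCE A (Python) =====
-- def constructHeader(value):
--     has_env_var = any(env_var != "" for _, _, _, env_var in value)
--     has_default = any(default != "" for _, _, default, _ in value)
--     header = "| Flag | Description |"
--     columns = "| --- | --- |"
--     if has_default:
--         header += " Default |"
--         columns += " --- |"
--     if has_env_var:
--         header += " Enviroment Variable |"
--         columns += " --- |"
--     return header + "\n" + columns, has_default, has_env_var
-- ===== SOURCE B (Python) =====
-- def constructHeader(value):
--     # Fold the rows into a 2-bit presence mask (bit0: default, bit1: env var),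
--     # then select the finished header from a 4-entry table indexed by the mask.
--     mask = 0
--     for _, _, default, env_var in value:
--         mask |= (default != "") + 2 * (env_var != "")
--     table = (
--         "| Flag | Description |\n| --- | --- |",
--         "| Flag | Description | Default |\n| --- | --- | --- |",
--         "| Flag | Description | Enviroment Variable |\n| --- | --- | --- |",
--         "| Flag | Description | Default | Enviroment Variable |\n| --- | --- | --- | --- |",
--     )
--     return table[mask], bool(mask & 1), bool(mask & 2)
-- ===== Notes on version B (the rewrite author's own statement) =====
-- stated objective: alternative
-- what changed: Replaces the two any() scans and the branch-by-branch string concatenation by a single OR-fold into a 2-bit presence mask and a lookup of the finished header in a 4-entry literal table indexed by the mask.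
import Mathlib
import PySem

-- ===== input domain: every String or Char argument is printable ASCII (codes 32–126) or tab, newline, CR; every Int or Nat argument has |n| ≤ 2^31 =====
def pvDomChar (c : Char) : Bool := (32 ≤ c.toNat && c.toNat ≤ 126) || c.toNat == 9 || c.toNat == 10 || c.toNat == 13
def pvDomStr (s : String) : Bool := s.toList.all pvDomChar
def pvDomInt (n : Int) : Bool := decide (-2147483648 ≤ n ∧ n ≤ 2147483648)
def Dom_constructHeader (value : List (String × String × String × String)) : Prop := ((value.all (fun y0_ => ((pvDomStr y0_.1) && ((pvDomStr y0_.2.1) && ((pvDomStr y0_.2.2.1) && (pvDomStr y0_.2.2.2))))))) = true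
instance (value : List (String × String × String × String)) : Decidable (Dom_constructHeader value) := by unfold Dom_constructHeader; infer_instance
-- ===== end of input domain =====

-- B replaces A's two any() scans and conditional concatenation by an OR-fold into a 2-bit
-- presence mask and a 4-entry literal table lookup (alternative decomposition, same cost).

-- ===== PORT A =====
def constructHeader (value : List (String × String × String × String)) : String × Bool × Bool :=
  let has_env_var := value.any (fun p => p.2.2.2 != "")
  let has_default := value.any (fun p => p.2.2.1 != "")
  let header := "| Flag | Description |"
  let columns := "| --- | --- |"
  let header := if has_default then header ++ " Default |" else header
  let columns := if has_default then columns ++ " --- |" else columns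
  let header := if has_env_var then header ++ " Enviroment Variable |" else header
  let columns := if has_env_var then columns ++ " --- |" else columns
  (header ++ "\n" ++ columns, has_default, has_env_var)

-- ===== PORT B =====
def constructHeader_alt (value : List (String × String × String × String)) : String × Bool × Bool :=
  let mask : Nat := value.foldl
    (fun m p => m ||| ((if p.2.2.1 != "" then 1 else 0) + 2 * (if p.2.2.2 != "" then 1 else 0)))
    0
  let table : List String :=
    ["| Flag | Description |\n| --- | --- |",
     "| Flag | Description | Default |\n| --- | --- | --- |",
     "| Flag | Description | Enviroment Variable |\n| --- | --- | --- |",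
     "| Flag | Description | Default | Enviroment Variable |\n| --- | --- | --- | --- |"]
  -- table[mask]: mask is always < 4, so plain indexing is exact here
  (table.getD mask "", (mask &&& 1) != 0, (mask &&& 2) != 0)

-- ===== PRECONDITION & SPEC =====
def Spec_constructHeader (value : List (String × String × String × String)) (out : String × Bool × Bool) : Prop := out = constructHeader_alt value
instance (value : List (String × String × String × String)) (out : String × Bool × Bool) : Decidable (Spec_constructHeader value out) := by unfold Spec_constructHeader; infer_instance

-- ===== CLAIM =====
def Claim_equal_constructHeader : Prop := ∀ (value : List (String × String × String × String)), Dom_constructHeader value → Spec_constructHeader value (constructHeader value)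

-- ===== LEMMAS AND PROOFS =====
theorem constructHeader_fold_mask
    (l : List (String × String × String × String)) (m : Nat) :
    l.foldl (fun m p => m ||| ((if p.2.2.1 != "" then 1 else 0) + 2 * (if p.2.2.2 != "" then 1 else 0))) m
    = m ||| (((if l.any (fun p => p.2.2.1 != "") then 1 else 0) : Nat)
             + 2 * (if l.any (fun p => p.2.2.2 != "") then 1 else 0)) := by
  induction l generalizing m with
  | nil => simp
  | cons h t ih =>
    simp only [List.foldl_cons, List.any_cons, ih]
    by_cases hd : h.2.2.1 != "" <;> by_cases he : h.2.2.2 != "" <;>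
      by_cases td : t.any (fun p => p.2.2.1 != "") = true <;>
      by_cases te : t.any (fun p => p.2.2.2 != "") = true <;>
      simp [hd, he, td, te, Nat.or_assoc]

-- ===== VERDICT =====
theorem constructHeader_spec : Claim_equal_constructHeader := by
  intro value _
  unfold Spec_constructHeader constructHeader constructHeader_alt
  simp only [constructHeader_fold_mask, Nat.zero_or]
  cases hd : value.any (fun p => p.2.2.1 != "") <;>
    cases he : value.any (fun p => p.2.2.2 != "") <;> decide
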